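-- pv_equiv track=rewrite | github.com/morelandfm/2D-Pose-Generation | 3dpolyCoordsGenerator.py | separateCoords
-- ===== SOURCE A (Python) =====
-- def separateCoords(polyInfo):
--     x, y, z = [], [], []
--     for group in polyInfo:
--         for plane in group:
--             for pt in plane:
--                 x.append(pt[0])
--                 y.append(pt[1])
--                 z.append(pt[2])
--     return x, y, z
-- ===== SOURCE B (Python) =====
-- def separateCoords(polyInfo):
--     flat = [pt for group in polyInfo for plane in group for pt in plane]
--     x = [pt[0] for pt in flat]
--     y = [pt[1] for pt in flat]
--     z = [pt[2] for pt in flat]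
--     return x, y, z
-- ===== Notes on version B (the rewrite author's own statement) =====
-- stated objective: idiomatic
-- what changed: B first flattens the nested structure into one list of points, then derives x, y, z by three independent projection passes, instead of A's single triple-nested loop appending to three accumulators.
import Mathlib
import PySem

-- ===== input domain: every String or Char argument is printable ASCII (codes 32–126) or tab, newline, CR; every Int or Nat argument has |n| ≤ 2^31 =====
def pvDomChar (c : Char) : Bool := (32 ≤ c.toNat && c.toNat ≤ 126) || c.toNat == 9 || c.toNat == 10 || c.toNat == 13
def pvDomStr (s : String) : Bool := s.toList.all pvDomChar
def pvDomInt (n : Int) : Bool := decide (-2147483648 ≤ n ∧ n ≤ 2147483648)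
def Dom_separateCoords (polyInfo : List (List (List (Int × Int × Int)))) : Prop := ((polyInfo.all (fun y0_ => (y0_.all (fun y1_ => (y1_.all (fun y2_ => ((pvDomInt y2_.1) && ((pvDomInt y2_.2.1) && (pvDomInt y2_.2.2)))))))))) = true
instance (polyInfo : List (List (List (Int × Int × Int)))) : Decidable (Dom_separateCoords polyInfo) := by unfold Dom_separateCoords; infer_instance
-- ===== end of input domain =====

-- B flattens the nested points into one intermediate list, then projects x, y, z in three
-- separate passes, instead of A's single triple-nested loop appending to three accumulators.

-- ===== PORT A =====
-- A: triple nested loop, appending pt[0]/pt[1]/pt[2] to the three accumulators x, y, z.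
def separateCoords (polyInfo : List (List (List (Int × Int × Int)))) : List Int × List Int × List Int :=
  polyInfo.foldl (fun s group =>
    group.foldl (fun s plane =>
      plane.foldl (fun s pt =>
        (s.1 ++ [pt.1], s.2.1 ++ [pt.2.1], s.2.2 ++ [pt.2.2])) s) s) ([], [], [])

-- ===== PORT B =====
-- B: build the flattened point list, then three projection passes.
def separateCoords_alt (polyInfo : List (List (List (Int × Int × Int)))) : List Int × List Int × List Int :=
  let flat := polyInfo.flatMap (fun group => group.flatMap (fun plane => plane))
  (flat.map (fun pt => pt.1), flat.map (fun pt => pt.2.1), flat.map (fun pt => pt.2.2))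

-- ===== PRECONDITION & SPEC =====
def Spec_separateCoords (polyInfo : List (List (List (Int × Int × Int)))) (out : List Int × List Int × List Int) : Prop := out = separateCoords_alt polyInfo
instance (polyInfo : List (List (List (Int × Int × Int)))) (out : List Int × List Int × List Int) : Decidable (Spec_separateCoords polyInfo out) := by unfold Spec_separateCoords; infer_instance

-- ===== CLAIM (what is proved, stated in full; the proofs are below) =====
def Claim_equal_separateCoords : Prop := ∀ (polyInfo : List (List (List (Int × Int × Int)))), Dom_separateCoords polyInfo → Spec_separateCoords polyInfo (separateCoords polyInfo)

-- ===== LEMMAS AND PROOFS =====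

-- A's inner loop over one plane appends that plane's projections to the state.
theorem plane_loop (plane : List (Int × Int × Int)) (s : List Int × List Int × List Int) :
    plane.foldl (fun s pt => (s.1 ++ [pt.1], s.2.1 ++ [pt.2.1], s.2.2 ++ [pt.2.2])) s
      = (s.1 ++ plane.map (fun pt => pt.1),
         s.2.1 ++ plane.map (fun pt => pt.2.1),
         s.2.2 ++ plane.map (fun pt => pt.2.2)) := by
  induction plane generalizing s with
  | nil => simp
  | cons p ps ih => simp [ih]

-- A's middle loop over one group appends that group's flattened projections.
theorem group_loop (group : List (List (Int × Int × Int))) (s : List Int × List Int × List Int) :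
    group.foldl (fun s plane =>
        plane.foldl (fun s pt => (s.1 ++ [pt.1], s.2.1 ++ [pt.2.1], s.2.2 ++ [pt.2.2])) s) s
      = (s.1 ++ (group.flatMap (fun plane => plane)).map (fun pt => pt.1),
         s.2.1 ++ (group.flatMap (fun plane => plane)).map (fun pt => pt.2.1),
         s.2.2 ++ (group.flatMap (fun plane => plane)).map (fun pt => pt.2.2)) := by
  induction group generalizing s with
  | nil => simp
  | cons g gs ih => rw [List.foldl_cons, plane_loop, ih]; simp

-- A's outer loop, from any state.
theorem outer_loop (polyInfo : List (List (List (Int × Int × Int)))) (s : List Int × List Int × List Int) :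
    polyInfo.foldl (fun s group =>
        group.foldl (fun s plane =>
          plane.foldl (fun s pt => (s.1 ++ [pt.1], s.2.1 ++ [pt.2.1], s.2.2 ++ [pt.2.2])) s) s) s
      = (s.1 ++ (polyInfo.flatMap (fun group => group.flatMap (fun plane => plane))).map (fun pt => pt.1),
         s.2.1 ++ (polyInfo.flatMap (fun group => group.flatMap (fun plane => plane))).map (fun pt => pt.2.1),
         s.2.2 ++ (polyInfo.flatMap (fun group => group.flatMap (fun plane => plane))).map (fun pt => pt.2.2)) := by
  induction polyInfo generalizing s with
  | nil => simp
  | cons g gs ih => rw [List.foldl_cons, group_loop, ih]; simp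

-- ===== VERDICT (by name: the statement is the Claim_ definition above) =====
theorem separateCoords_spec : Claim_equal_separateCoords := by
  intro polyInfo _
  unfold Spec_separateCoords separateCoords separateCoords_alt
  simp [outer_loop]
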